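-- pv_equiv track=rewrite | github.com/jonatan-ms/timestamp-optimizer | enhanced_compression.py | compress_millis_variable
-- ===== SOURCE A (Python) =====
-- def compress_millis_variable(millis, reference_date=1577836800000):  # Jan 1, 2020
--     """
--     Variable-length encoding for timestamps.
--     Uses fewer characters for more recent timestamps (closer to reference date).
--
--     Args:
--         millis (int): Milliseconds since epoch
--         reference_date (int): Reference date in milliseconds
--
--     Returns:
--         str: Variable-length encoded string
--     """
--     # Calculate difference from reference date
--     diff = millis - reference_date
--
--     # Encode sign
--     sign = '+' if diff >= 0 else '-'
--     abs_diff = abs(diff)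
--
--     # Use Base62 for the absolute difference
--     chars = "0123456789abcdefghijklmnopqrstuvwxyzABCDEFGHIJKLMNOPQRSTUVWXYZ"
--     base = len(chars)  # 62
--
--     result = ""
--     number = abs_diff
--
--     while number > 0:
--         result = chars[number % base] + result
--         number //= base
--
--     if not result:
--         result = "0"
--
--     # Return sign + encoded absolute difference
--     return sign + result
-- ===== SOURCE B (Python) =====
-- def compress_millis_variable(millis, reference_date=1577836800000):  # Jan 1, 2020
--     chars = "0123456789abcdefghijklmnopqrstuvwxyzABCDEFGHIJKLMNOPQRSTUVWXYZ"
--     diff = millis - reference_date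
--     n = abs(diff)
--     # positional encoding: find the digit count k, then read each Base62 digit
--     # directly by dividing by the matching power of 62 (high-order first)
--     k = 1
--     while 62 ** k <= n:
--         k += 1
--     digits = ''.join(chars[(n // 62 ** (k - 1 - i)) % 62] for i in range(k))
--     return ('+' if diff >= 0 else '-') + digits
-- ===== Notes on version B (the rewrite author's own statement) =====
-- stated objective: alternative
-- what changed: Replaces A's low-to-high accumulator loop (prepend chars[n%62], n//=62, plus the empty-string fallback) with a positional scheme: first count the Base62 digits with a power comparison loop, then read each digit high-order first by dividing by the matching power of 62; the '0' fallback disappears since the digit count is always at least 1.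
import Mathlib
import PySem

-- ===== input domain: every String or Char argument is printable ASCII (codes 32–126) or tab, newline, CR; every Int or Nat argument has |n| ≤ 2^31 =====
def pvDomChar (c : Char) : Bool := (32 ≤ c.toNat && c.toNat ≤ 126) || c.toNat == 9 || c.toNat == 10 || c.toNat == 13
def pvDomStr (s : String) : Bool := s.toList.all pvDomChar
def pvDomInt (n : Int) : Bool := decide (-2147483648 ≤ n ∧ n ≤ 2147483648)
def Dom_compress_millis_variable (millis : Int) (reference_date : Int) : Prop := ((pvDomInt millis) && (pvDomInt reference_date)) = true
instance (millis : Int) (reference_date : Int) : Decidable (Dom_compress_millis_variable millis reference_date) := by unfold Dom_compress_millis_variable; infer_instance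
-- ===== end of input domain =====

-- B replaces A's low-to-high while loop (prepend digit, divide by 62) with a positional
-- scheme: it first counts the Base62 digits, then reads each digit high-order first by
-- dividing by the matching power of 62; alternative decomposition, same cost.

-- ===== PORT A =====
def pvChars : List Char := "0123456789abcdefghijklmnopqrstuvwxyzABCDEFGHIJKLMNOPQRSTUVWXYZ".toList

-- A's while loop: result = chars[number % 62] + result; number //= 62 (number ≥ 0, so Nat)
def pvLoopA (number : Nat) (result : List Char) : List Char :=
  if number > 0 then
    pvLoopA (number / 62) (pvChars.getD (number % 62) '0' :: result)
  else result
termination_by number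
decreasing_by exact Nat.div_lt_self (by omega) (by omega)

def compress_millis_variable (millis : Int) (reference_date : Int) : String :=
  let diff := millis - reference_date
  let sign := if diff ≥ 0 then "+" else "-"
  let abs_diff := diff.natAbs
  let result := pvLoopA abs_diff []
  let result := if result = [] then ['0'] else result
  sign ++ String.ofList result

-- ===== PORT B =====
-- B's while loop: k = 1; while 62 ** k <= n: k += 1
def pvDigitCount (n : Nat) (k : Nat) : Nat :=
  if 62 ^ k ≤ n then pvDigitCount n (k + 1) else k
termination_by n + 1 - 62 ^ k
decreasing_by
  have h1 : 62 ^ k < 62 ^ (k + 1) := Nat.pow_lt_pow_right (by omega) (by omega)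
  omega

def compress_millis_variable_alt (millis : Int) (reference_date : Int) : String :=
  let chars := "0123456789abcdefghijklmnopqrstuvwxyzABCDEFGHIJKLMNOPQRSTUVWXYZ".toList
  let diff := millis - reference_date
  let n := diff.natAbs
  let k := pvDigitCount n 1
  let digits := (List.range k).map (fun i => chars.getD ((n / 62 ^ (k - 1 - i)) % 62) '0')
  (if diff ≥ 0 then "+" else "-") ++ String.ofList digits

-- ===== PRECONDITION & SPEC =====
def Spec_compress_millis_variable (millis : Int) (reference_date : Int) (out : String) : Prop := out = compress_millis_variable_alt millis reference_date
instance (millis : Int) (reference_date : Int) (out : String) : Decidable (Spec_compress_millis_variable millis reference_date out) := by unfold Spec_compress_millis_variable; infer_instance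

-- ===== CLAIM (what is proved, stated in full; the proofs are below) =====
def Claim_equal_compress_millis_variable : Prop := ∀ (millis : Int) (reference_date : Int), Dom_compress_millis_variable millis reference_date → Spec_compress_millis_variable millis reference_date (compress_millis_variable millis reference_date)

-- ===== LEMMAS AND PROOFS =====

-- B's digit list for a given digit count k
def pvDigitsOf (k n : Nat) : List Char :=
  (List.range k).map (fun i => pvChars.getD ((n / 62 ^ (k - 1 - i)) % 62) '0')

theorem pvDigitsOf_succ (k n : Nat) :
    pvDigitsOf (k + 1) n = pvDigitsOf k (n / 62) ++ [pvChars.getD (n % 62) '0'] := by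
  unfold pvDigitsOf
  rw [List.range_succ, List.map_append]
  congr 1
  · apply List.map_congr_left
    intro i hi
    have hik : i < k := List.mem_range.mp hi
    have : k + 1 - 1 - i = (k - 1 - i) + 1 := by omega
    rw [this, pow_succ', ← Nat.div_div_eq_div_mul]
  · simp

theorem pvLoopA_eq_digits (k : Nat) : ∀ n acc, 62 ^ (k - 1) ≤ n → n < 62 ^ k →
    pvLoopA n acc = pvDigitsOf k n ++ acc := by
  induction k with
  | zero => intro n acc h1 h2; simp at h1 h2; omega
  | succ k ih =>
    intro n acc h1 h2
    have hn : 0 < n := lt_of_lt_of_le (Nat.pow_pos (by omega)) h1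
    rw [pvLoopA, if_pos hn, pvDigitsOf_succ]
    rcases Nat.eq_zero_or_pos k with hk | hk
    · subst hk
      have hlt : n / 62 = 0 := Nat.div_eq_of_lt (by simpa using h2)
      rw [hlt, pvLoopA]
      simp [pvDigitsOf]
    · have hge : 62 ^ (k - 1) ≤ n / 62 := by
        rw [Nat.le_div_iff_mul_le (by omega)]
        calc 62 ^ (k - 1) * 62 = 62 ^ k := by
              rw [← pow_succ]; congr 1; omega
          _ ≤ n := by simpa using h1
      have hlt : n / 62 < 62 ^ k := by
        rw [Nat.div_lt_iff_lt_mul (by omega), ← pow_succ]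
        exact h2
      rw [ih (n / 62) _ hge hlt]
      simp

theorem pvDigitCount_ge (n : Nat) : ∀ k, k ≤ pvDigitCount n k := by
  intro k
  induction k using pvDigitCount.induct n with
  | case1 k h ih => rw [pvDigitCount, if_pos h]; omega
  | case2 k h => rw [pvDigitCount, if_neg h]

theorem pvDigitCount_lt (n : Nat) : ∀ k, n < 62 ^ pvDigitCount n k := by
  intro k
  induction k using pvDigitCount.induct n with
  | case1 k h ih => rw [pvDigitCount, if_pos h]; exact ih
  | case2 k h => rw [pvDigitCount, if_neg h]; omega

theorem pvDigitCount_low (n : Nat) : ∀ k, pvDigitCount n k = k ∨ 62 ^ (pvDigitCount n k - 1) ≤ n := by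
  intro k
  induction k using pvDigitCount.induct n with
  | case1 k h ih =>
    rw [pvDigitCount, if_pos h]
    rcases ih with heq | hle
    · right; rw [heq]; simpa using h
    · right; exact hle
  | case2 k h => left; rw [pvDigitCount, if_neg h]

-- ===== VERDICT (by name: the statement is the Claim_ definition above) =====
theorem compress_millis_variable_spec : Claim_equal_compress_millis_variable := by
  intro millis reference_date _
  unfold Spec_compress_millis_variable compress_millis_variable compress_millis_variable_alt
  simp only
  set n := (millis - reference_date).natAbs with hn
  rcases Nat.eq_zero_or_pos n with h0 | hpos
  · rw [h0]
    have hk : pvDigitCount 0 1 = 1 := by rw [pvDigitCount]; norm_num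
    rw [hk, pvLoopA]
    simp
  · have hlow : 62 ^ (pvDigitCount n 1 - 1) ≤ n := by
      rcases pvDigitCount_low n 1 with heq | hle
      · rw [heq]; simpa using hpos
      · exact hle
    have hloop := pvLoopA_eq_digits (pvDigitCount n 1) n [] hlow (pvDigitCount_lt n 1)
    have hkpos : 0 < pvDigitCount n 1 := pvDigitCount_ge n 1
    have hne : pvDigitsOf (pvDigitCount n 1) n ≠ [] := by
      unfold pvDigitsOf
      simp [List.range_eq_nil]
      omega
    rw [hloop]
    simp only [List.append_nil]
    rw [if_neg hne]
    rfl
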